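-- pv_equiv track=rewrite | github.com/a-karro/advent.2019 | 4.py | is_better
-- ===== SOURCE A (Python) =====
-- def is_better(number):
--     number = str(number)
--     for i in range(10):
--         s = str(i) * 2
--         s1 = str(i) * 3
--         if number.count(s) > 0 and number.count(s1) == 0:
--             return True
--     return False
-- ===== SOURCE B (Python) =====
-- def is_better(number):
--     s = str(number)
--     best = {}
--     i = 0
--     while i < len(s):
--         j = i
--         while j < len(s) and s[j] == s[i]:
--             j += 1
--         if j - i > best.get(s[i], 0):
--             best[s[i]] = j - i
--         i = j
--     return any(best.get(d, 0) == 2 for d in "0123456789")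
-- ===== Notes on version B (the rewrite author's own statement) =====
-- stated objective: alternative
-- what changed: Replaced the ten per-digit whole-string substring counts ('dd' present and 'ddd' absent) by a single left-to-right run-length scan that records each character's maximal run length in a dict, answering whether some digit's maximal run is exactly 2.
import Mathlib
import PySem

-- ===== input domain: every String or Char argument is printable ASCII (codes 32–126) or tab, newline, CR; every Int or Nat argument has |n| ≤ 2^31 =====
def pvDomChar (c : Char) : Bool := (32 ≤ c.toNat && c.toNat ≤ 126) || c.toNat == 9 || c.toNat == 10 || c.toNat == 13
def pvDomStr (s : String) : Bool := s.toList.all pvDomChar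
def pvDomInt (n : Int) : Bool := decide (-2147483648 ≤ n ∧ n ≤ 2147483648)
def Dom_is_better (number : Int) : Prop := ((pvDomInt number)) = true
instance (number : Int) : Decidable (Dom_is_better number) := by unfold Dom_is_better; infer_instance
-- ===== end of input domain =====

-- B replaces A's ten per-digit substring counts over the whole string by one run-length pass
-- recording each digit's maximal run length; same return value, alternative decomposition.

-- ===== PORT A =====
-- for i in range(10): if number.count(str(i)*2) > 0 and number.count(str(i)*3) == 0: return True; return False
def is_better (number : Int) : Bool :=
  let numberC := PySem.Int.toChars number
  (PySem.List.pyRange 0 10 1).any (fun i =>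
    let s := PySem.List.pyRepeat (PySem.Int.toChars i) 2
    let s1 := PySem.List.pyRepeat (PySem.Int.toChars i) 3
    decide (0 < PySem.Chars.count numberC s) && decide (PySem.Chars.count numberC s1 = 0))

-- ===== PORT B =====
-- the while-loop of Source B: consume the leading run of equal characters, record it in `best`
-- when it beats the stored maximum, continue after the run
def bRuns : List Char → PySem.Dict Char Int → PySem.Dict Char Int
  | [], best => best
  | c :: rest, best =>
      let run : Int := 1 + ((rest.takeWhile (fun x => x == c)).length : Int)
      let best' := if best.getD c 0 < run then best.insert c run else best
      bRuns (rest.dropWhile (fun x => x == c)) best'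
termination_by s _ => s.length
decreasing_by
  simpa using Nat.lt_succ_of_le (List.length_dropWhile_le _ _)

-- return any(best.get(d, 0) == 2 for d in "0123456789")
def is_better_alt (number : Int) : Bool :=
  let s := PySem.Int.toChars number
  let best := bRuns s PySem.Dict.empty
  ("0123456789".toList).any (fun d => best.getD d 0 == 2)

-- ===== PRECONDITION & SPEC =====
def Spec_is_better (number : Int) (out : Bool) : Prop := out = is_better_alt number
instance (number : Int) (out : Bool) : Decidable (Spec_is_better number out) := by unfold Spec_is_better; infer_instance

-- ===== CLAIM (what is proved, stated in full; the proofs are below) =====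
def Claim_equal_is_better : Prop := ∀ (number : Int), Dom_is_better number → Spec_is_better number (is_better number)

-- ===== LEMMAS AND PROOFS =====

-- the accumulator of PySem.Chars.count.go only grows
theorem pv_go_ge (sub : List Char) : ∀ (fuel : Nat) (l : List Char) (acc : Nat),
    acc ≤ PySem.Chars.count.go sub fuel l acc := by
  intro fuel
  induction fuel with
  | zero => intro l acc; simp [PySem.Chars.count.go]
  | succ n ih =>
    intro l acc
    cases l with
    | nil => simp [PySem.Chars.count.go]
    | cons h t =>
      rw [show PySem.Chars.count.go sub (n+1) (h :: t) acc =
        if sub.isPrefixOf (h :: t) then PySem.Chars.count.go sub n (List.drop sub.length (h :: t)) (acc+1)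
        else PySem.Chars.count.go sub n t acc from by simp [PySem.Chars.count.go]]
      split
      · exact le_trans (Nat.le_succ acc) (ih _ _)
      · exact ih _ _

-- count.go returns its accumulator unchanged exactly when the pattern is not an infix
theorem pv_go_eq_acc_iff (sub : List Char) (hsub : sub ≠ []) :
    ∀ (fuel : Nat) (l : List Char) (acc : Nat), l.length ≤ fuel →
    (PySem.Chars.count.go sub fuel l acc = acc ↔ ¬ sub <:+: l) := by
  intro fuel
  induction fuel with
  | zero =>
    intro l acc hl
    have : l = [] := List.eq_nil_of_length_eq_zero (Nat.le_zero.mp hl)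
    subst this
    simp [PySem.Chars.count.go, List.infix_nil, hsub]
  | succ n ih =>
    intro l acc hl
    cases l with
    | nil => simp [PySem.Chars.count.go, List.infix_nil, hsub]
    | cons h t =>
      rw [show PySem.Chars.count.go sub (n+1) (h :: t) acc =
        if sub.isPrefixOf (h :: t) then PySem.Chars.count.go sub n (List.drop sub.length (h :: t)) (acc+1)
        else PySem.Chars.count.go sub n t acc from by simp [PySem.Chars.count.go]]
      by_cases hp : sub.isPrefixOf (h :: t)
      · rw [if_pos hp]
        have hge := pv_go_ge sub n (List.drop sub.length (h :: t)) (acc+1)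
        constructor
        · intro he; omega
        · intro hn
          exact absurd ((List.isPrefixOf_iff_prefix.mp hp).isInfix) hn
      · rw [if_neg hp]
        have ht : t.length ≤ n := by simpa using hl
        rw [ih t acc ht]
        constructor
        · intro hn hi
          rcases List.infix_cons_iff.mp hi with hpre | hinf
          · exact hp (List.isPrefixOf_iff_prefix.mpr hpre)
          · exact hn hinf
        · intro hn hi
          exact hn (List.infix_cons_iff.mpr (Or.inr hi))

-- s.count(sub) == 0 says exactly "sub does not occur in s" (for nonempty sub)
theorem pv_count_eq_zero_iff (l sub : List Char) (hsub : sub ≠ []) :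
    PySem.Chars.count l sub = 0 ↔ ¬ sub <:+: l := by
  unfold PySem.Chars.count
  rw [if_neg (by simpa [List.isEmpty_iff] using hsub)]
  exact pv_go_eq_acc_iff sub hsub l.length l 0 le_rfl

-- maximal run length of c in a list, as the max over all suffixes of the leading-run length
def pvM (c : Char) : List Char → Nat
  | [] => 0
  | a :: t => max (if a = c then (t.takeWhile (fun x => x == c)).length + 1 else 0) (pvM c t)

theorem pv_rep_prefix_iff (c : Char) : ∀ (s : List Char) (k : Nat),
    (List.replicate k c <+: s ↔ k ≤ (s.takeWhile (fun x => x == c)).length) := by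
  intro s
  induction s with
  | nil =>
    intro k
    cases k with
    | zero => simp
    | succ m => simp [List.replicate_succ]
  | cons a t ih =>
    intro k
    cases k with
    | zero => simp
    | succ m =>
      rw [List.replicate_succ]
      by_cases hac : a = c
      · subst hac
        simp only [List.takeWhile_cons, beq_self_eq_true, if_true, List.length_cons]
        rw [List.cons_prefix_cons]
        simpa using ih m
      · simp only [List.takeWhile_cons]
        rw [List.cons_prefix_cons]
        simp [hac, Ne.symm hac]

theorem pv_takeWhile_cons_len (c a : Char) (t : List Char) :
    ((a :: t).takeWhile (fun x => x == c)).length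
      = if a = c then (t.takeWhile (fun x => x == c)).length + 1 else 0 := by
  by_cases hac : a = c
  · subst hac; simp
  · simp [hac]

-- a block of k equal characters occurs in s iff some run of that character has length ≥ k
theorem pv_rep_infix_iff (c : Char) (k : Nat) (hk : 1 ≤ k) : ∀ (s : List Char),
    (List.replicate k c <:+: s ↔ k ≤ pvM c s) := by
  intro s
  induction s with
  | nil =>
    simp only [List.infix_nil, pvM]
    constructor
    · intro h
      have := congrArg List.length h
      simp [List.length_replicate] at this
      omega
    · omega
  | cons a t ih =>
    rw [List.infix_cons_iff, pv_rep_prefix_iff c (a :: t) k, ih, pv_takeWhile_cons_len]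
    show _ ↔ k ≤ pvM c (a :: t)
    simp only [pvM]
    exact le_max_iff.symm

-- pvM follows the run-skipping recursion of bRuns
theorem pvM_skeleton (c a : Char) : ∀ (t : List Char),
    pvM c (a :: t) = max (if a = c then (t.takeWhile (fun x => x == a)).length + 1 else 0)
      (pvM c (t.dropWhile (fun x => x == a))) := by
  intro t
  induction t with
  | nil => by_cases hac : a = c <;> simp [pvM, hac]
  | cons b t' ih =>
    by_cases hba : b = a
    · subst hba
      have hL : pvM c (b :: b :: t') = max (if b = c then ((b :: t').takeWhile (fun x => x == c)).length + 1 else 0) (pvM c (b :: t')) := rfl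
      rw [hL, ih]
      by_cases hac : b = c
      · subst hac
        rw [pv_takeWhile_cons_len b b t']
        simp only [if_pos rfl, List.takeWhile_cons, beq_self_eq_true, List.length_cons,
          List.dropWhile_cons, if_true]
        rw [← Nat.max_assoc]
        congr 1
        omega
      · have hbc : (b == c) = false := by simpa using hac
        simp [List.takeWhile_cons, List.dropWhile_cons, hac]
    · have hba' : (b == a) = false := by simpa using hba
      have hL : pvM c (a :: b :: t') = max (if a = c then ((b :: t').takeWhile (fun x => x == c)).length + 1 else 0) (pvM c (b :: t')) := rfl
      rw [hL]
      by_cases hac : a = c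
      · subst hac
        simp [List.takeWhile_cons, List.dropWhile_cons, hba']
      · simp [List.takeWhile_cons, List.dropWhile_cons, hac, hba']

-- the dict built by bRuns holds, at each key, the max of its previous value and that key's maximal run
theorem pv_bRuns_getD (c : Char) : ∀ (n : Nat) (s : List Char), s.length ≤ n →
    ∀ (d : PySem.Dict Char Int), 0 ≤ d.getD c 0 →
    (bRuns s d).getD c 0 = max (d.getD c 0) ((pvM c s : Int)) := by
  intro n
  induction n with
  | zero =>
    intro s hs d hd
    have : s = [] := List.eq_nil_of_length_eq_zero (Nat.le_zero.mp hs)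
    subst this
    simp [bRuns, pvM, hd]
  | succ m ih =>
    intro s hs d hd
    cases s with
    | nil => simp [bRuns, pvM, hd]
    | cons a rest =>
      simp only [bRuns]
      set run : Int := 1 + ((rest.takeWhile (fun x => x == a)).length : Int) with hrun
      set d' := if d.getD a 0 < run then d.insert a run else d with hd'def
      have hd' : d'.getD c 0 = max (d.getD c 0) (if a = c then run else 0) := by
        rw [hd'def]
        by_cases hac : a = c
        · subst hac
          rw [if_pos rfl]
          split_ifs with hlt
          · rw [PySem.Dict.getD_insert_self]; omega
          · omega
        · rw [if_neg hac]
          split_ifs with hlt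
          · rw [PySem.Dict.getD_insert_of_ne d run 0 (fun h => hac h.symm)]; omega
          · omega
      have hd'nn : 0 ≤ d'.getD c 0 := by rw [hd']; positivity
      have hlen : (rest.dropWhile (fun x => x == a)).length ≤ m := by
        have := List.length_dropWhile_le (fun x => x == a) rest
        simp at hs
        omega
      rw [ih _ hlen d' hd'nn, hd', pvM_skeleton c a rest, Nat.cast_max, max_assoc]
      congr 1
      by_cases hac : a = c
      · simp only [if_pos hac]
        push_cast
        omega
      · simp [hac]

-- per-digit bridge: A's two substring counts say exactly "maximal run of c is 2"
theorem pv_perdigit (c : Char) (s : List Char) :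
    (decide (0 < PySem.Chars.count s (PySem.List.pyRepeat [c] 2)) &&
     decide (PySem.Chars.count s (PySem.List.pyRepeat [c] 3) = 0))
    = ((bRuns s PySem.Dict.empty).getD c 0 == 2) := by
  have h2 : PySem.List.pyRepeat [c] 2 = List.replicate 2 c := by
    rw [PySem.List.pyRepeat_singleton]; rfl
  have h3 : PySem.List.pyRepeat [c] 3 = List.replicate 3 c := by
    rw [PySem.List.pyRepeat_singleton]; rfl
  have hg : (bRuns s PySem.Dict.empty).getD c 0 = ((pvM c s : Nat) : Int) := by
    rw [pv_bRuns_getD c s.length s le_rfl _ (by simp)]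
    simp
  rw [Bool.eq_iff_iff]
  simp only [Bool.and_eq_true, decide_eq_true_eq, beq_iff_eq, h2, h3, hg]
  rw [Nat.pos_iff_ne_zero, Ne, pv_count_eq_zero_iff s _ (by simp),
      pv_count_eq_zero_iff s _ (by simp), not_not,
      pv_rep_infix_iff c 2 (by omega) s, pv_rep_infix_iff c 3 (by omega) s]
  omega

theorem pv_main (n : Int) : is_better n = is_better_alt n := by
  simp only [is_better, is_better_alt]
  rw [show PySem.List.pyRange 0 10 1 = [0,1,2,3,4,5,6,7,8,9] from by decide,
      show "0123456789".toList = ['0','1','2','3','4','5','6','7','8','9'] from by decide]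
  simp only [List.any_cons, List.any_nil, Bool.or_false]
  rw [show PySem.Int.toChars 0 = ['0'] from by decide,
      show PySem.Int.toChars 1 = ['1'] from by decide,
      show PySem.Int.toChars 2 = ['2'] from by decide,
      show PySem.Int.toChars 3 = ['3'] from by decide,
      show PySem.Int.toChars 4 = ['4'] from by decide,
      show PySem.Int.toChars 5 = ['5'] from by decide,
      show PySem.Int.toChars 6 = ['6'] from by decide,
      show PySem.Int.toChars 7 = ['7'] from by decide,
      show PySem.Int.toChars 8 = ['8'] from by decide,
      show PySem.Int.toChars 9 = ['9'] from by decide,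
      pv_perdigit '0', pv_perdigit '1', pv_perdigit '2', pv_perdigit '3', pv_perdigit '4',
      pv_perdigit '5', pv_perdigit '6', pv_perdigit '7', pv_perdigit '8', pv_perdigit '9']

-- ===== VERDICT (by name: the statement is the Claim_ definition above) =====
theorem is_better_spec : Claim_equal_is_better := by
  intro n _
  exact pv_main n
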